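-- pv_equiv track=rewrite | github.com/pypi-data/pypi-mirror-396 | packages/django-deadcode/django_deadcode-0.8.0.tar.gz/django_deadcode-0.8.0/django_deadcode/management/commands/finddeadcode.py | _find_transitively_referenced_templates
-- ===== SOURCE A (Python) =====
-- def _find_transitively_referenced_templates(
--
--     directly_referenced: set[str],
--     template_includes: dict[str, set[str]],
--     template_extends: dict[str, set[str]],
-- ) -> set[str]:
--     """
--     Find all templates transitively referenced through include/extends.
--
--     Args:
--         directly_referenced: Templates directly referenced by views
--         template_includes: Map of template -> set of included templates
--         template_extends: Map of template -> set of extended templates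
--
--     Returns:
--         Set of all transitively referenced templates
--     """
--     transitively_referenced = set()
--     to_process = list(directly_referenced)
--     processed = set()
--
--     while to_process:
--         current = to_process.pop()
--
--         # Skip if already processed to avoid infinite loops
--         if current in processed:
--             continue
--         processed.add(current)
--
--         # Add included templates
--         if current in template_includes:
--             for included in template_includes[current]:
--                 if included not in transitively_referenced:
--                     transitively_referenced.add(included)
--                     to_process.append(included)
--
--         # Add extended templates
--         if current in template_extends:
--             for extended in template_extends[current]:
--                 if extended not in transitively_referenced:
--                     transitively_referenced.add(extended)
--                     to_process.append(extended)
--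
--     return transitively_referenced
-- ===== SOURCE B (Python) =====
-- def _find_transitively_referenced_templates(
--     directly_referenced,
--     template_includes,
--     template_extends,
-- ):
--     """Recursive depth-first traversal of the include/extends graph."""
--     referenced = set()
--     visited = set()
--
--     def visit(template):
--         if template in visited:
--             return
--         visited.add(template)
--         new = []
--         for graph in (template_includes, template_extends):
--             for neighbor in graph.get(template, ()):
--                 if neighbor not in referenced:
--                     referenced.add(neighbor)
--                     new.append(neighbor)
--         for neighbor in new:
--             visit(neighbor)
--
--     for template in directly_referenced:
--         visit(template)
--     return referenced
-- ===== Notes on version B (the rewrite author's own statement) =====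
-- stated objective: alternative
-- what changed: the iterative explicit-stack worklist loop is replaced by a recursive depth-first traversal: a nested visit helper marks a node visited, batch-adds its not-yet-seen include/extends neighbours, and recurses into them, driven by a loop over the seeds
import Mathlib
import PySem

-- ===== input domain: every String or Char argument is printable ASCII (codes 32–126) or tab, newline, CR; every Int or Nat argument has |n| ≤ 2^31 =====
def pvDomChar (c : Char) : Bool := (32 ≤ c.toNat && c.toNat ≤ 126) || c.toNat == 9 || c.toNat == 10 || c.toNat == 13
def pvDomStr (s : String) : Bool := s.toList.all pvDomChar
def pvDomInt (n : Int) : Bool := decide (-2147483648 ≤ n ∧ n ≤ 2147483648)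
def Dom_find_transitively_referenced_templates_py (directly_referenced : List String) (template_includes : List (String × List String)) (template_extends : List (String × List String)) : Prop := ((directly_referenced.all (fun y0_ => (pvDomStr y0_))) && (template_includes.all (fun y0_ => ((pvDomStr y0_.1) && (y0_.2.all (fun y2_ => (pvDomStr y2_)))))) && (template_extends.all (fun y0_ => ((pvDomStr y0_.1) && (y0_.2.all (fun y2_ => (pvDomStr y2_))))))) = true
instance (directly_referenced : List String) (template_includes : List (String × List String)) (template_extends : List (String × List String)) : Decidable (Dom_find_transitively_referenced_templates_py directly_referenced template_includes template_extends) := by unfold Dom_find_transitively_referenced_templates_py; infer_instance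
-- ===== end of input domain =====

-- B replaces A's iterative explicit-stack worklist by a recursive depth-first traversal
-- (objective: alternative decomposition, same asymptotic cost); return values proved equal.

-- ===== PORT A =====
-- all neighbour occurrences stored in a dict's values (used only for the termination measure)
def pvVals (d : List (String × List String)) : List String := (d.map Prod.snd).flatten
def pvAllN (inc ext : List (String × List String)) : List String := pvVals inc ++ pvVals ext
-- termination potential: number of neighbour occurrences whose value is not yet in the result set
def pvT (L : List String) (r : PySem.Set String) : Nat :=
  (L.filter (fun x => !(PySem.Set.contains r x))).length

-- one iteration of A's inner 'for' body: push a not-yet-referenced neighbour (stack kept head=top)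
def pvPushA (acc : PySem.Set String × List String) (n : String) : PySem.Set String × List String :=
  if PySem.Set.contains acc.1 n then acc else (PySem.Set.add acc.1 n, n :: acc.2)

lemma pvContainsF {s : PySem.Set String} {x : String} (h : x ∉ s) :
    PySem.Set.contains s x = false := by
  simpa using h

lemma pvT_add_lt (L : List String) (r : PySem.Set String) (n : String)
    (hnL : n ∈ L) (hn : n ∉ r) :
    pvT L (PySem.Set.add r n) < pvT L r := by
  unfold pvT
  have hsub : List.Sublist (L.filter (fun x => !(PySem.Set.contains (PySem.Set.add r n) x)))
      (L.filter (fun x => !(PySem.Set.contains r x))) := by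
    apply List.monotone_filter_right
    intro a ha
    simp only [Bool.not_eq_eq_eq_not, Bool.not_true] at *
    have h1 : a ∉ PySem.Set.add r n := by simpa using ha
    exact pvContainsF (fun hm => h1 ((PySem.Set.mem_add r n a).mpr (Or.inl hm)))
  rcases lt_or_eq_of_le hsub.length_le with h | h
  · exact h
  · exfalso
    have heq := hsub.eq_of_length h
    have hmem : n ∈ L.filter (fun x => !(PySem.Set.contains r x)) := by
      simp [List.mem_filter, hnL, hn]
    rw [← heq] at hmem
    simp [List.mem_filter] at hmem

lemma pvPushA_fold_le (L : List String) :
    ∀ (l : List String) (acc : PySem.Set String × List String), (∀ x ∈ l, x ∈ L) →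
      pvT L (l.foldl pvPushA acc).1 + (l.foldl pvPushA acc).2.length
        ≤ pvT L acc.1 + acc.2.length := by
  intro l
  induction l with
  | nil => intro acc h; simp
  | cons n t ih =>
    intro acc h
    simp only [List.foldl_cons]
    by_cases hc : n ∈ acc.1
    · rw [show pvPushA acc n = acc by simp [pvPushA, hc]]
      exact ih acc (fun x hx => h x (List.mem_cons_of_mem _ hx))
    · rw [show pvPushA acc n = (PySem.Set.add acc.1 n, n :: acc.2) by
        simp [pvPushA, hc]]
      have h1 := ih (PySem.Set.add acc.1 n, n :: acc.2) (fun x hx => h x (List.mem_cons_of_mem _ hx))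
      have h2 := pvT_add_lt L acc.1 n (h n (List.mem_cons_self ..)) hc
      simp only [List.length_cons] at h1
      omega

lemma pvMemGetD (d : List (String × List String)) (c x : String)
    (hx : x ∈ (PySem.Dict.mk d).getD c []) : x ∈ pvVals d := by
  induction d with
  | nil => simp [PySem.Dict.getD, PySem.Dict.get?] at hx
  | cons kv t ih =>
    rw [PySem.Dict.getD_eq_get?_getD, PySem.Dict.get?_mk_cons] at hx
    by_cases hk : kv.1 == c
    · rw [if_pos hk] at hx
      simp only [Option.getD_some] at hx
      exact List.mem_flatten.mpr ⟨kv.2, by simp, hx⟩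
    · rw [if_neg hk] at hx
      rw [← PySem.Dict.getD_eq_get?_getD] at hx
      have := ih hx
      simp only [pvVals, List.map_cons, List.flatten_cons] at this ⊢
      exact List.mem_append_right _ this

lemma pvIfFoldA (d : List (String × List String)) (c : String)
    (acc : PySem.Set String × List String) :
    (if (PySem.Dict.mk d).contains c
     then ((PySem.Dict.mk d).getD c []).foldl pvPushA acc else acc)
    = ((PySem.Dict.mk d).getD c []).foldl pvPushA acc := by
  by_cases h : (PySem.Dict.mk d).contains c = true
  · simp [h]
  · have hb : (PySem.Dict.mk d).contains c = false := by
      cases hb : (PySem.Dict.mk d).contains c with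
      | false => rfl
      | true => exact absurd hb h
    have he : (PySem.Dict.mk d).getD c [] = [] := PySem.Dict.getD_of_not_contains _ _ hb
    simp [h, he]

-- processing of one popped node: the two guarded 'for' loops over includes then extends
def pvStep2 (inc ext : List (String × List String)) (c : String)
    (r : PySem.Set String) (st : List String) : PySem.Set String × List String :=
  let a1 := if (PySem.Dict.mk inc).contains c
            then ((PySem.Dict.mk inc).getD c []).foldl pvPushA (r, st) else (r, st)
  if (PySem.Dict.mk ext).contains c
  then ((PySem.Dict.mk ext).getD c []).foldl pvPushA a1 else a1

lemma pvStep2_le (inc ext : List (String × List String)) (c : String)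
    (r : PySem.Set String) (st : List String) :
    pvT (pvAllN inc ext) (pvStep2 inc ext c r st).1 + (pvStep2 inc ext c r st).2.length
      ≤ pvT (pvAllN inc ext) r + st.length := by
  unfold pvStep2
  simp only [pvIfFoldA]
  have hi : ∀ x ∈ (PySem.Dict.mk inc).getD c [], x ∈ pvAllN inc ext :=
    fun x hx => List.mem_append_left _ (pvMemGetD _ _ _ hx)
  have he : ∀ x ∈ (PySem.Dict.mk ext).getD c [], x ∈ pvAllN inc ext :=
    fun x hx => List.mem_append_right _ (pvMemGetD _ _ _ hx)
  have h1 := pvPushA_fold_le (pvAllN inc ext) ((PySem.Dict.mk inc).getD c []) (r, st) hi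
  have h2 := pvPushA_fold_le (pvAllN inc ext) ((PySem.Dict.mk ext).getD c [])
    (((PySem.Dict.mk inc).getD c []).foldl pvPushA (r, st)) he
  simp only at h1
  omega

-- A's while loop; the Python list 'to_process' (pop/append at the END) is kept reversed: head = top.
-- A's 'to_process = list(directly_referenced)' lists a Python SET: its hash order is unspecified and
-- the returned set does not depend on it; the port takes the elements in the given list order.
def pvLoopA (inc ext : List (String × List String)) :
    List String → PySem.Set String → PySem.Set String → PySem.Set String × PySem.Set String
  | [], p, r => (p, r)
  | c :: rest, p, r =>
    if PySem.Set.contains p c then pvLoopA inc ext rest p r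
    else
      pvLoopA inc ext (pvStep2 inc ext c r rest).2 (PySem.Set.add p c) (pvStep2 inc ext c r rest).1
termination_by stack _ r => stack.length + pvT (pvAllN inc ext) r
decreasing_by
  · simp
  · have := pvStep2_le inc ext c r rest
    simp only [List.length_cons]
    omega

def find_transitively_referenced_templates_py (directly_referenced : List String)
    (template_includes : List (String × List String))
    (template_extends : List (String × List String)) : List String :=
  (pvLoopA template_includes template_extends directly_referenced.reverse
    PySem.Set.empty PySem.Set.empty).2

-- ===== PORT B =====
-- B's neighbour iteration '(for graph in (includes, extends)) for neighbor in graph.get(template, ())':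
-- the two guarded loops fold over the concatenation of the two dict values
def pvNbrs (inc ext : List (String × List String)) (c : String) : List String :=
  (PySem.Dict.mk inc).getD c [] ++ (PySem.Dict.mk ext).getD c []

-- body of B's neighbour collection loop: record unseen neighbours in 'new'
def pvCollect (acc : PySem.Set String × List String) (n : String) : PySem.Set String × List String :=
  if PySem.Set.contains acc.1 n then acc else (PySem.Set.add acc.1 n, acc.2 ++ [n])

-- B's recursive visit, state = (visited, referenced); the Nat fuel only makes the recursion total
-- in Lean (it is proved never to run out at the fuel passed below).  Source B iterates Python SETS in
-- the seed loop and inside graph.get(...): their hash order is unspecified and the returned set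
-- does not depend on it; the port fixes concrete orders (seeds and the 'new' recursion list are
-- taken right-to-left).
mutual
def pvDfs (inc ext : List (String × List String)) :
    Nat → String → PySem.Set String × PySem.Set String → PySem.Set String × PySem.Set String
  | 0, _, s => s
  | f+1, c, s =>
    if PySem.Set.contains s.1 c then s
    else
      pvDfsList inc ext f ((pvNbrs inc ext c).foldl pvCollect (s.2, [])).2.reverse
        (PySem.Set.add s.1 c, ((pvNbrs inc ext c).foldl pvCollect (s.2, [])).1)
termination_by f _ _ => (f, 0)

def pvDfsList (inc ext : List (String × List String)) :
    Nat → List String → PySem.Set String × PySem.Set String → PySem.Set String × PySem.Set String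
  | _, [], s => s
  | f, n :: rest, s => pvDfsList inc ext f rest (pvDfs inc ext f n s)
termination_by f l _ => (f, l.length)
end

def find_transitively_referenced_templates_py_alt (directly_referenced : List String)
    (template_includes : List (String × List String))
    (template_extends : List (String × List String)) : List String :=
  (pvDfsList template_includes template_extends
    ((pvAllN template_includes template_extends).length + 1)
    directly_referenced.reverse (PySem.Set.empty, PySem.Set.empty)).2

-- ===== PRECONDITION & SPEC =====
def Spec_find_transitively_referenced_templates_py (directly_referenced : List String)
    (template_includes : List (String × List String))
    (template_extends : List (String × List String)) (out : List String) : Prop :=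
  out = find_transitively_referenced_templates_py_alt directly_referenced template_includes template_extends

instance (directly_referenced : List String) (template_includes : List (String × List String)) (template_extends : List (String × List String)) (out : List String) : Decidable (Spec_find_transitively_referenced_templates_py directly_referenced template_includes template_extends out) := by unfold Spec_find_transitively_referenced_templates_py; infer_instance

-- ===== CLAIM =====
def Claim_equal_find_transitively_referenced_templates_py : Prop := ∀ (directly_referenced : List String) (template_includes : List (String × List String)) (template_extends : List (String × List String)), Dom_find_transitively_referenced_templates_py directly_referenced template_includes template_extends → Spec_find_transitively_referenced_templates_py directly_referenced template_includes template_extends (find_transitively_referenced_templates_py directly_referenced template_includes template_extends)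

-- ===== LEMMAS AND PROOFS =====

lemma pvNbrs_mem (inc ext : List (String × List String)) (c : String) :
    ∀ x ∈ pvNbrs inc ext c, x ∈ pvAllN inc ext := by
  intro x hx
  rcases List.mem_append.mp hx with h | h
  · exact List.mem_append_left _ (pvMemGetD _ _ _ h)
  · exact List.mem_append_right _ (pvMemGetD _ _ _ h)

-- the collection loop's accumulator splits off
lemma pvCollect_fold_acc :
    ∀ (l : List String) (r : PySem.Set String) (acc : List String),
      l.foldl pvCollect (r, acc)
        = ((l.foldl pvCollect (r, [])).1, acc ++ (l.foldl pvCollect (r, [])).2) := by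
  intro l
  induction l with
  | nil => intro r acc; simp
  | cons n t ih =>
    intro r acc
    simp only [List.foldl_cons]
    by_cases hc : n ∈ r
    · rw [show pvCollect (r, acc) n = (r, acc) by simp [pvCollect, hc],
        show pvCollect (r, []) n = (r, []) by simp [pvCollect, hc]]
      exact ih r acc
    · rw [show pvCollect (r, acc) n = (PySem.Set.add r n, acc ++ [n]) by
          simp [pvCollect, hc],
        show pvCollect (r, []) n = (PySem.Set.add r n, [n]) by simp [pvCollect, hc]]
      rw [ih (PySem.Set.add r n) (acc ++ [n]), ih (PySem.Set.add r n) [n]]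
      simp

-- A's push loop is B's collection loop with the new elements pushed reversed on top of the stack
lemma pvPushA_vs_collect :
    ∀ (l : List String) (r : PySem.Set String) (st : List String),
      l.foldl pvPushA (r, st)
        = ((l.foldl pvCollect (r, [])).1, (l.foldl pvCollect (r, [])).2.reverse ++ st) := by
  intro l
  induction l with
  | nil => intro r st; simp
  | cons n t ih =>
    intro r st
    simp only [List.foldl_cons]
    by_cases hc : n ∈ r
    · rw [show pvPushA (r, st) n = (r, st) by simp [pvPushA, hc],
        show pvCollect (r, []) n = (r, []) by simp [pvCollect, hc]]
      exact ih r st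
    · rw [show pvPushA (r, st) n = (PySem.Set.add r n, n :: st) by
          simp [pvPushA, hc],
        show pvCollect (r, []) n = (PySem.Set.add r n, [n]) by simp [pvCollect, hc]]
      rw [ih (PySem.Set.add r n) (n :: st), pvCollect_fold_acc t (PySem.Set.add r n) [n]]
      simp

lemma pvCollect_fold_le (L : List String) (l : List String) (r : PySem.Set String)
    (h : ∀ x ∈ l, x ∈ L) :
    pvT L (l.foldl pvCollect (r, [])).1 + (l.foldl pvCollect (r, [])).2.length ≤ pvT L r := by
  have h1 := pvPushA_fold_le L l (r, []) h
  rw [pvPushA_vs_collect l r []] at h1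
  simp at h1
  omega

lemma pvCollect_nil_fst (l : List String) (r : PySem.Set String)
    (h : (l.foldl pvCollect (r, [])).2 = []) : (l.foldl pvCollect (r, [])).1 = r := by
  induction l with
  | nil => simp
  | cons n t ih =>
    simp only [List.foldl_cons] at h ⊢
    by_cases hc : n ∈ r
    · rw [show pvCollect (r, []) n = (r, []) by
        simp [pvCollect, hc]] at h ⊢
      exact ih h
    · rw [show pvCollect (r, []) n = (PySem.Set.add r n, [n]) by
        simp [pvCollect, hc]] at h
      rw [pvCollect_fold_acc t (PySem.Set.add r n) [n]] at h
      simp at h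

-- one processing step of A, phrased through B's collection loop
lemma pvStep2_eq (inc ext : List (String × List String)) (c : String)
    (r : PySem.Set String) (st : List String) :
    pvStep2 inc ext c r st
      = (((pvNbrs inc ext c).foldl pvCollect (r, [])).1,
         ((pvNbrs inc ext c).foldl pvCollect (r, [])).2.reverse ++ st) := by
  have h1 : pvStep2 inc ext c r st = (pvNbrs inc ext c).foldl pvPushA (r, st) := by
    unfold pvStep2 pvNbrs
    simp only [pvIfFoldA]
    rw [List.foldl_append]
  rw [h1, pvPushA_vs_collect]

lemma pvLoopA_nil (inc ext : List (String × List String)) (p r : PySem.Set String) :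
    pvLoopA inc ext [] p r = (p, r) := by
  simp [pvLoopA]

lemma pvLoopA_cons (inc ext : List (String × List String)) (c : String) (rest : List String)
    (p r : PySem.Set String) :
    pvLoopA inc ext (c :: rest) p r
      = if PySem.Set.contains p c then pvLoopA inc ext rest p r
        else pvLoopA inc ext
          (((pvNbrs inc ext c).foldl pvCollect (r, [])).2.reverse ++ rest)
          (PySem.Set.add p c) ((pvNbrs inc ext c).foldl pvCollect (r, [])).1 := by
  rw [pvLoopA]
  simp only [pvStep2_eq]

lemma pvLoopA_T_le (inc ext : List (String × List String)) :
    ∀ (n : Nat) (l : List String) (p r : PySem.Set String),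
      l.length + pvT (pvAllN inc ext) r ≤ n →
      pvT (pvAllN inc ext) (pvLoopA inc ext l p r).2 ≤ pvT (pvAllN inc ext) r := by
  intro n
  induction n with
  | zero =>
    intro l p r h
    have : l = [] := List.length_eq_zero_iff.mp (by omega)
    subst this; rw [pvLoopA_nil]
  | succ n ih =>
    intro l p r h
    match l with
    | [] => rw [pvLoopA_nil]
    | c :: rest =>
      rw [pvLoopA_cons]
      simp only [List.length_cons] at h
      by_cases hc : PySem.Set.contains p c = true
      · rw [if_pos hc]; exact ih rest p r (by omega)
      · rw [if_neg hc]
        have hT := pvCollect_fold_le (pvAllN inc ext) (pvNbrs inc ext c) r (pvNbrs_mem inc ext c)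
        refine le_trans (ih _ _ _ ?_) (by omega)
        simp only [List.length_append, List.length_reverse]
        omega

lemma pvLoopA_append (inc ext : List (String × List String)) :
    ∀ (n : Nat) (a b : List String) (p r : PySem.Set String),
      a.length + pvT (pvAllN inc ext) r ≤ n →
      pvLoopA inc ext (a ++ b) p r
        = pvLoopA inc ext b (pvLoopA inc ext a p r).1 (pvLoopA inc ext a p r).2 := by
  intro n
  induction n with
  | zero =>
    intro a b p r h
    have : a = [] := List.length_eq_zero_iff.mp (by omega)
    subst this; rw [pvLoopA_nil]; simp
  | succ n ih =>
    intro a b p r h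
    match a with
    | [] => rw [pvLoopA_nil]; simp
    | c :: rest =>
      simp only [List.length_cons] at h
      rw [List.cons_append, pvLoopA_cons, pvLoopA_cons inc ext c rest]
      by_cases hc : PySem.Set.contains p c = true
      · rw [if_pos hc, if_pos hc]
        exact ih rest b p r (by omega)
      · rw [if_neg hc, if_neg hc]
        have hT := pvCollect_fold_le (pvAllN inc ext) (pvNbrs inc ext c) r (pvNbrs_mem inc ext c)
        rw [← List.append_assoc]
        exact ih _ b _ _ (by simp only [List.length_append, List.length_reverse]; omega)

-- the central simulation: A's worklist loop = B's depth-first traversal (with enough fuel)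
lemma pvMain (inc ext : List (String × List String)) :
    ∀ (n : Nat) (l : List String) (p r : PySem.Set String) (f : Nat),
      l.length + pvT (pvAllN inc ext) r ≤ n →
      pvT (pvAllN inc ext) r + 1 ≤ f →
      pvLoopA inc ext l p r = pvDfsList inc ext f l (p, r) := by
  intro n
  induction n with
  | zero =>
    intro l p r f h hf
    have : l = [] := List.length_eq_zero_iff.mp (by omega)
    subst this; rw [pvLoopA_nil, pvDfsList]
  | succ n ih =>
    intro l p r f h hf
    match l with
    | [] => rw [pvLoopA_nil, pvDfsList]
    | c :: rest =>
      match f with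
      | 0 => omega
      | f + 1 =>
        simp only [List.length_cons] at h
        rw [pvLoopA_cons, pvDfsList]
        by_cases hm : c ∈ p
        · have hct : PySem.Set.contains p c = true := by simpa using hm
          rw [if_pos hct, show pvDfs inc ext (f + 1) c (p, r) = (p, r) by rw [pvDfs]; simp [hm]]
          exact ih rest p r (f + 1) (by omega) hf
        · have hcf : ¬ PySem.Set.contains p c = true := by simpa using hm
          rw [if_neg hcf]
          have hT := pvCollect_fold_le (pvAllN inc ext) (pvNbrs inc ext c) r (pvNbrs_mem inc ext c)
          have hdfs : pvDfs inc ext (f + 1) c (p, r)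
              = pvDfsList inc ext f ((pvNbrs inc ext c).foldl pvCollect (r, [])).2.reverse
                  (PySem.Set.add p c, ((pvNbrs inc ext c).foldl pvCollect (r, [])).1) := by
            rw [pvDfs]; simp [hm]
          by_cases hne : ((pvNbrs inc ext c).foldl pvCollect (r, [])).2 = []
          · -- nothing new was referenced: the result set is unchanged
            have h1 := pvCollect_nil_fst (pvNbrs inc ext c) r hne
            rw [hdfs, hne, h1]
            simp only [List.reverse_nil, List.nil_append]
            rw [show pvDfsList inc ext f [] (PySem.Set.add p c, r) = (PySem.Set.add p c, r) by
              rw [pvDfsList]]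
            exact ih rest (PySem.Set.add p c) r (f + 1) (by omega) hf
          · -- at least one new element entered the result set: fuel f suffices below
            have hlen : 0 < ((pvNbrs inc ext c).foldl pvCollect (r, [])).2.length :=
              List.length_pos_iff.mpr hne
            rw [pvLoopA_append inc ext n _ rest _ _
              (by simp only [List.length_reverse]; omega)]
            have hX := ih ((pvNbrs inc ext c).foldl pvCollect (r, [])).2.reverse
              (PySem.Set.add p c) ((pvNbrs inc ext c).foldl pvCollect (r, [])).1 f
              (by simp only [List.length_reverse]; omega) (by omega)
            have hXT := pvLoopA_T_le inc ext n
              ((pvNbrs inc ext c).foldl pvCollect (r, [])).2.reverse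
              (PySem.Set.add p c) ((pvNbrs inc ext c).foldl pvCollect (r, [])).1
              (by simp only [List.length_reverse]; omega)
            rw [hdfs, ← hX]
            rw [ih rest _ _ (f + 1) (by omega) (by omega)]

lemma pvT_le_len (L : List String) (r : PySem.Set String) : pvT L r ≤ L.length :=
  List.length_filter_le _ _

-- ===== VERDICT =====
theorem find_transitively_referenced_templates_py_spec : Claim_equal_find_transitively_referenced_templates_py := by
  unfold Claim_equal_find_transitively_referenced_templates_py
  intro dr inc ext _
  unfold Spec_find_transitively_referenced_templates_py
  unfold find_transitively_referenced_templates_py find_transitively_referenced_templates_py_alt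
  have h := pvMain inc ext (dr.reverse.length + pvT (pvAllN inc ext) PySem.Set.empty)
    dr.reverse PySem.Set.empty PySem.Set.empty ((pvAllN inc ext).length + 1)
    le_rfl (by have := pvT_le_len (pvAllN inc ext) PySem.Set.empty; omega)
  rw [h]
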